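-- pv_equiv track=rewrite | github.com/AnishYarrakonda/USACO-Python | Week 8 Forced Decisions/easy_as_tote_nowhere.py | solve
-- ===== SOURCE A (Python) =====
-- def solve(p):
--     letter_counts = {}
--     for letter in p:
--         if letter not in letter_counts:
--             letter_counts[letter] = 0
--         letter_counts[letter] += 1
--     digit_counts = [0]*10
--     for key_letter, digit_word, digit in (('Z', 'ZERO', 0),
--                                           ('W', 'TWO', 2),
--                                           ('U', 'FOUR', 4),
--                                           ('X', 'SIX', 6),
--                                           ('G', 'EIGHT', 8),
--                                           ('O', 'ONE', 1),
--                                           ('H', 'THREE', 3),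
--                                           ('F', 'FIVE', 5),
--                                           ('S', 'SEVEN', 7),
--                                           ('I', 'NINE', 9)):
--         if key_letter in letter_counts and letter_counts[key_letter] > 0:
--             letter_dict = {}
--             for letter in digit_word:
--                 if letter not in letter_dict:
--                     letter_dict[letter] = 0
--                 letter_dict[letter] += 1
--             key_letter_count = letter_counts[key_letter]
--             digit_counts[digit] = key_letter_count
--             for k, v in letter_dict.items():
--                 letter_counts[k] -= key_letter_count * v
--     ans = ''
--     if digit_counts[0] != 0:
--         for dd in range(1, 10):
--             if digit_counts[dd] != 0:
--                 ans += str(dd)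
--                 digit_counts[dd] -= 1
--                 break
--     for d in range(10):
--         ans += str(d)*digit_counts[d]
--     return ans
-- ===== SOURCE B (Python) =====
-- def solve(p):
--     # Closed-form decode: each digit from unique-letter counts by a direct formula.
--     def n(c):
--         return sum(ch == c for ch in p)
--     d0 = n('Z')
--     d2 = n('W')
--     d4 = n('U')
--     d6 = n('X')
--     d8 = n('G')
--     d1 = max(0, n('O') - d0 - d2 - d4)
--     d3 = max(0, n('H') - d8)
--     d5 = max(0, n('F') - d4)
--     d7 = max(0, n('S') - d6)
--     d9 = max(0, n('I') - d6 - d8 - d5)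
--     d = [d0, d1, d2, d3, d4, d5, d6, d7, d8, d9]
--     ans = ''
--     if d[0] != 0:
--         for dd in range(1, 10):
--             if d[dd] != 0:
--                 ans += str(dd)
--                 d[dd] -= 1
--                 break
--     for i in range(10):
--         ans += str(i) * d[i]
--     return ans
-- ===== Notes on version B (the rewrite author's own statement) =====
-- stated objective: simpler
-- what changed: A builds a letter-count dict and then runs a mutating cascade that, for each digit word, rebuilds the word's letter counts in an inner dict and subtracts multiples from the shared counter; B computes each digit directly by one closed-form formula over the letter counts (d0=n(Z), d2=n(W), d4=n(U), d6=n(X), d8=n(G), then d1,d3,d5,d7,d9 as clamped differences), with no dicts and no mutation of shared state.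
import Mathlib
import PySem

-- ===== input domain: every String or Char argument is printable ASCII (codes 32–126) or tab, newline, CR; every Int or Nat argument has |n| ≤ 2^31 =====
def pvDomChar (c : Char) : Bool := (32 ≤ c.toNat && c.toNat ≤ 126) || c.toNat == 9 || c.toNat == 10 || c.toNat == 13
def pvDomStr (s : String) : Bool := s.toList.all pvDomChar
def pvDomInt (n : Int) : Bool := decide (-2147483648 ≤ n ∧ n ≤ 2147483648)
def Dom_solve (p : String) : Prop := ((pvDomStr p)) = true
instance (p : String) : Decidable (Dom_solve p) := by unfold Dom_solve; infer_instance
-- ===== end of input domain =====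

-- B replaces A's mutating dict-subtraction cascade by one closed-form formula per digit;
-- the final answer-assembly block (shared verbatim by both Pythons) is the shared helper below.

-- ===== PORT A =====

-- counting loop: `if letter not in d: d[letter] = 0; d[letter] += 1`
def solveCountLoop (l : List Char) (d : PySem.Dict Char Int) : PySem.Dict Char Int :=
  l.foldl (fun d c =>
    let d := if d.contains c then d else d.insert c 0
    d.insert c (d.getD c 0 + 1)) d

-- the table of (key_letter, digit_word, digit) tuples, in A's order
def solveWords : List (Char × List Char × Nat) :=
  [('Z', "ZERO".toList, 0), ('W', "TWO".toList, 2), ('U', "FOUR".toList, 4),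
   ('X', "SIX".toList, 6), ('G', "EIGHT".toList, 8), ('O', "ONE".toList, 1),
   ('H', "THREE".toList, 3), ('F', "FIVE".toList, 5), ('S', "SEVEN".toList, 7),
   ('I', "NINE".toList, 9)]

-- one iteration of A's outer loop.  `letter_counts[k] -= …` raises KeyError when k is
-- absent; that is ported as insert/getD (exact on Pre_solve, which excludes KeyError inputs).
def solveStage (st : PySem.Dict Char Int × List Int) (t : Char × List Char × Nat) :
    PySem.Dict Char Int × List Int :=
  let lc := st.1
  let dc := st.2
  let k := t.1
  let w := t.2.1
  let i := t.2.2
  if lc.contains k ∧ 0 < lc.getD k 0 then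
    let ld := solveCountLoop w PySem.Dict.empty
    let klc := lc.getD k 0
    let dc := dc.set i klc
    let lc := ld.items.foldl (fun lc kv => lc.insert kv.1 (lc.getD kv.1 0 - klc * kv.2)) lc
    (lc, dc)
  else (lc, dc)

-- `for dd in range(1,10): if dc[dd] != 0: ans += str(dd); dc[dd] -= 1; break`
def solveFindLead (dds : List Int) (dc : List Int) : List Char × List Int :=
  match dds with
  | [] => ([], dc)
  | dd :: rest =>
    if PySem.List.pyGetD dc dd 0 ≠ 0 then
      (PySem.Int.toChars dd, PySem.List.pySetD dc dd (PySem.List.pyGetD dc dd 0 - 1))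
    else solveFindLead rest dc

-- A's final answer-assembly block (identical source code in both Pythons, hence shared)
def solveAssemble (dc0 : List Int) : String :=
  let st := if PySem.List.pyGetD dc0 0 0 ≠ 0 then solveFindLead (PySem.List.pyRange 1 10 1) dc0
            else ([], dc0)
  String.ofList ((PySem.List.pyRange 0 10 1).foldl
    (fun a d => a ++ PySem.List.pyRepeat (PySem.Int.toChars d) (PySem.List.pyGetD st.2 d 0)) st.1)

def solve (p : String) : String :=
  let lc := solveCountLoop p.toList PySem.Dict.empty
  let st := solveWords.foldl solveStage (lc, List.replicate 10 (0 : Int))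
  solveAssemble st.2

-- ===== PORT B =====

-- `sum(ch == c for ch in p)`
def solveAltN (p : String) (c : Char) : Int :=
  (p.toList.map (fun ch => if ch == c then (1 : Int) else 0)).sum

def solve_alt (p : String) : String :=
  let d0 := solveAltN p 'Z'
  let d2 := solveAltN p 'W'
  let d4 := solveAltN p 'U'
  let d6 := solveAltN p 'X'
  let d8 := solveAltN p 'G'
  let d1 := max 0 (solveAltN p 'O' - d0 - d2 - d4)
  let d3 := max 0 (solveAltN p 'H' - d8)
  let d5 := max 0 (solveAltN p 'F' - d4)
  let d7 := max 0 (solveAltN p 'S' - d6)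
  let d9 := max 0 (solveAltN p 'I' - d6 - d8 - d5)
  solveAssemble [d0, d1, d2, d3, d4, d5, d6, d7, d8, d9]

-- ===== PRECONDITION & SPEC =====
-- Pre_solve excludes exactly the inputs on which Python A raises KeyError: a digit's key
-- letter still has positive count when its word is processed, but some other letter of
-- that word never occurs in p (so `letter_counts[k] -= …` hits a missing key).
def Pre_solve (p : String) : Prop :=
  (0 < p.toList.count 'Z' → 'E' ∈ p.toList ∧ 'R' ∈ p.toList ∧ 'O' ∈ p.toList) ∧
  (0 < p.toList.count 'W' → 'T' ∈ p.toList ∧ 'O' ∈ p.toList) ∧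
  (0 < p.toList.count 'U' → 'F' ∈ p.toList ∧ 'O' ∈ p.toList ∧ 'R' ∈ p.toList) ∧
  (0 < p.toList.count 'X' → 'S' ∈ p.toList ∧ 'I' ∈ p.toList) ∧
  (0 < p.toList.count 'G' → 'E' ∈ p.toList ∧ 'I' ∈ p.toList ∧ 'H' ∈ p.toList ∧ 'T' ∈ p.toList) ∧
  (0 < (p.toList.count 'O' : Int) - p.toList.count 'Z' - p.toList.count 'W' - p.toList.count 'U' →
    'N' ∈ p.toList ∧ 'E' ∈ p.toList) ∧
  (0 < (p.toList.count 'H' : Int) - p.toList.count 'G' →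
    'T' ∈ p.toList ∧ 'R' ∈ p.toList ∧ 'E' ∈ p.toList) ∧
  (0 < (p.toList.count 'F' : Int) - p.toList.count 'U' →
    'I' ∈ p.toList ∧ 'V' ∈ p.toList ∧ 'E' ∈ p.toList) ∧
  (0 < (p.toList.count 'S' : Int) - p.toList.count 'X' →
    'E' ∈ p.toList ∧ 'V' ∈ p.toList ∧ 'N' ∈ p.toList) ∧
  (0 < (p.toList.count 'I' : Int) - p.toList.count 'X' - p.toList.count 'G'
      - max 0 ((p.toList.count 'F' : Int) - p.toList.count 'U') →
    'N' ∈ p.toList ∧ 'E' ∈ p.toList)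

instance (p : String) : Decidable (Pre_solve p) := by
  unfold Pre_solve
  exact @instDecidableAnd _ _ inferInstance (@instDecidableAnd _ _ inferInstance
    (@instDecidableAnd _ _ inferInstance (@instDecidableAnd _ _ inferInstance
    (@instDecidableAnd _ _ inferInstance (@instDecidableAnd _ _ inferInstance
    (@instDecidableAnd _ _ inferInstance (@instDecidableAnd _ _ inferInstance
    (@instDecidableAnd _ _ inferInstance inferInstance))))))))

def pvWitness_solve : String := "ZEROONE"

def Spec_solve (p : String) (out : String) : Prop := out = solve_alt p
instance (p : String) (out : String) : Decidable (Spec_solve p out) := by unfold Spec_solve; infer_instance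

-- ===== CLAIM (what is proved, stated in full; the proofs are below) =====
def Claim_equal_solve : Prop := ∀ (p : String), Dom_solve p → Pre_solve p → Spec_solve p (solve p)

-- ===== LEMMAS AND PROOFS =====

-- A's counting loop is the standard insert-getD-add-one loop (the membership test collapses)
lemma getD_of_contains_eq_false (d : PySem.Dict Char Int) (c : Char)
    (h : d.contains c = false) : d.getD c 0 = 0 := by
  simp only [PySem.Dict.getD, PySem.Dict.get?, PySem.Dict.contains] at *
  rw [List.find?_eq_none.mpr]
  · rfl
  · intro x hx
    simp only [List.any_eq_false] at h
    exact fun hb => (h x hx) hb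

-- A's counting loop is the standard insert-getD-add-one loop (the membership test collapses)
lemma solveCountLoop_eq (l : List Char) (d : PySem.Dict Char Int) :
    solveCountLoop l d = l.foldl (fun d x => d.insert x (d.getD x 0 + 1)) d := by
  induction l generalizing d with
  | nil => rfl
  | cons c cs ih =>
    have hcons : solveCountLoop (c :: cs) d = solveCountLoop cs
        (if d.contains c then d.insert c (d.getD c 0 + 1)
         else (d.insert c 0).insert c ((d.insert c 0).getD c 0 + 1)) := by
      simp only [solveCountLoop, List.foldl_cons]
      by_cases h : d.contains c <;> simp [h]
    rw [hcons, List.foldl_cons]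
    by_cases h : d.contains c
    · rw [if_pos h, ih]
    · rw [if_neg h, getD_of_contains_eq_false d c (Bool.not_eq_true _ ▸ eq_false_of_ne_true h),
          PySem.Dict.getD_insert_self, PySem.Dict.insert_insert_self, ih]

-- the subtraction loop over an items list with nodup keys, pointwise
lemma subLoop_getD (klc : Int) (items : List (Char × Int)) (lc : PySem.Dict Char Int)
    (hnd : (items.map Prod.fst).Nodup) (ch : Char) :
    (items.foldl (fun lc kv => lc.insert kv.1 (lc.getD kv.1 0 - klc * kv.2)) lc).getD ch 0
      = lc.getD ch 0 - klc * ((items.filter (fun kv => kv.1 == ch)).map Prod.snd).sum := by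
  induction items generalizing lc with
  | nil => simp
  | cons kv rest ih =>
    obtain ⟨k1, v1⟩ := kv
    simp only [List.map_cons, List.nodup_cons] at hnd
    obtain ⟨hk1, hrest⟩ := hnd
    rw [List.foldl_cons, ih _ hrest]
    by_cases hch : k1 = ch
    · subst hch
      have hfil : rest.filter (fun kv => kv.1 == k1) = [] := by
        rw [List.filter_eq_nil_iff]
        intro a ha hb
        exact hk1 (List.mem_map.mpr ⟨a, ha, by simpa using hb⟩)
      rw [PySem.Dict.getD_insert_self]
      simp [hfil]
    · rw [PySem.Dict.getD_insert_of_ne _ _ _ (Ne.symm hch)]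
      have hb : (((k1, v1) : Char × Int).1 == ch) = false := by simpa using hch
      simp [hb]

lemma subLoop_contains (klc : Int) (items : List (Char × Int)) (lc : PySem.Dict Char Int)
    (ch : Char) :
    (items.foldl (fun lc kv => lc.insert kv.1 (lc.getD kv.1 0 - klc * kv.2)) lc).contains ch
      = (lc.contains ch || (items.map Prod.fst).contains ch) := by
  induction items generalizing lc with
  | nil => simp
  | cons kv rest ih =>
    rw [List.foldl_cons, ih, PySem.Dict.contains_insert]
    simp [Bool.or_left_comm, Bool.or_assoc]

-- the filtered-items sum of a counter is the plain count
lemma filter_counter_sum (w : List Char) (ch : Char) :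
    (((PySem.Dict.counter w).items.filter (fun kv => kv.1 == ch)).map Prod.snd).sum
      = (w.count ch : Int) := by
  rw [PySem.Dict.items_counter, List.filter_map]
  have hcomp : ((fun kv : Char × Int => kv.1 == ch) ∘ fun k => (k, (w.count k : Int)))
      = fun k => k == ch := rfl
  rw [hcomp, List.filter_beq]
  by_cases hm : ch ∈ w
  · rw [List.count_eq_one_of_mem (PySem.Set.nodup_ofList w) ((PySem.Set.mem_ofList w ch).mpr hm)]
    simp
  · rw [List.count_eq_zero.mpr (fun hc => hm ((PySem.Set.mem_ofList w ch).mp hc))]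
    simp [List.count_eq_zero.mpr hm]

-- one stage of A's outer loop, against the functional model
lemma stage_spec (st : PySem.Dict Char Int × List Int) (m : Char → Int)
    (k : Char) (w : List Char) (i : Nat)
    (hm : ∀ ch, st.1.getD ch 0 = m ch) (hc : ∀ ch, st.1.contains ch = false → m ch = 0) :
    (∀ ch, (solveStage st (k, w, i)).1.getD ch 0 = m ch - max 0 (m k) * (w.count ch : Int)) ∧
    (∀ ch, (solveStage st (k, w, i)).1.contains ch = false →
      m ch - max 0 (m k) * (w.count ch : Int) = 0) ∧
    (solveStage st (k, w, i)).2 = if 0 < m k then st.2.set i (m k) else st.2 := by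
  by_cases hpos : 0 < m k
  · have hck : st.1.contains k = true := by
      by_contra hcf
      have := hc k (eq_false_of_ne_true hcf)
      omega
    have hcond : (st.1.contains k ∧ 0 < st.1.getD k 0) := ⟨hck, by rw [hm]; exact hpos⟩
    have hstage : solveStage st (k, w, i)
        = ((PySem.Dict.counter w).items.foldl
            (fun lc kv => lc.insert kv.1 (lc.getD kv.1 0 - st.1.getD k 0 * kv.2)) st.1,
           st.2.set i (st.1.getD k 0)) := by
      simp only [solveStage, if_pos hcond, solveCountLoop_eq,
        PySem.Dict.foldl_insert_getD_add_one_eq_counter]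
    have hnd : ((PySem.Dict.counter w).items.map Prod.fst).Nodup :=
      PySem.Dict.nodup_keys_counter w
    have hmaxk : max 0 (m k) = m k := max_eq_right (le_of_lt hpos)
    rw [hstage]
    refine ⟨fun ch => ?_, fun ch hcf => ?_, by rw [if_pos hpos, hm]⟩
    · rw [subLoop_getD _ _ _ hnd, filter_counter_sum, hm, hm, hmaxk]
    · rw [subLoop_contains] at hcf
      simp only [Bool.or_eq_false_iff] at hcf
      obtain ⟨h1, h2⟩ := hcf
      have hnw : ch ∉ w := by
        intro hin
        have hkeys : ch ∈ (PySem.Dict.counter w).items.map Prod.fst := by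
          have : ch ∈ PySem.Dict.keys (PySem.Dict.counter w) := by
            rw [PySem.Dict.keys_counter]
            exact (PySem.Set.mem_ofList w ch).mpr hin
          exact this
        have : ((PySem.Dict.counter w).items.map Prod.fst).contains ch = true := by
          simpa using hkeys
        rw [this] at h2; exact Bool.true_eq_false.mp h2
      rw [hc ch h1, List.count_eq_zero.mpr hnw]
      simp
  · have hcond : ¬ (st.1.contains k ∧ 0 < st.1.getD k 0) := by
      rintro ⟨-, hlt⟩; rw [hm] at hlt; omega
    have hstage : solveStage st (k, w, i) = (st.1, st.2) := by
      simp only [solveStage, if_neg hcond]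
    rw [hstage]
    have hmax : max 0 (m k) = 0 := by omega
    refine ⟨fun ch => by rw [hm, hmax]; ring, fun ch hcf => ?_, by rw [if_neg hpos]⟩
    rw [hc ch hcf, hmax]; ring

lemma set_zero_of_getD_zero : ∀ (l : List Int) (i : Nat), l.getD i 0 = 0 → l.set i 0 = l := by
  intro l
  induction l with
  | nil => intro i _; rfl
  | cons a t ih =>
    intro i h
    cases i with
    | zero => simpa using h.symm ▸ rfl
    | succ j => simp only [List.set_cons_succ]; rw [ih j (by simpa using h)]

lemma set_if_eq (dc : List Int) (i : Nat) (v : Int)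
    (h0 : dc.getD i 0 = 0) :
    (if 0 < v then dc.set i v else dc) = dc.set i (max 0 v) := by
  by_cases h : 0 < v
  · rw [if_pos h, max_eq_right (le_of_lt h)]
  · rw [if_neg h, max_eq_left (by omega), set_zero_of_getD_zero dc i h0]

-- B's letter count is the list count
lemma solveAltN_eq (p : String) (c : Char) : solveAltN p c = (p.toList.count c : Int) := by
  unfold solveAltN
  rw [PySem.List.sum_map_ite_one_zero (fun ch => ch == c) p.toList]
  simp [List.count_eq_countP]

-- max 0 of a cast count is the count itself
lemma hmaxnat (n : Nat) : max 0 ((n : Int)) = (n : Int) := max_eq_right (Int.natCast_nonneg n)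

lemma cnt_EIGHT_F : "EIGHT".toList.count 'F' = 0 := by decide
lemma cnt_EIGHT_H : "EIGHT".toList.count 'H' = 1 := by decide
lemma cnt_EIGHT_I : "EIGHT".toList.count 'I' = 1 := by decide
lemma cnt_EIGHT_O : "EIGHT".toList.count 'O' = 0 := by decide
lemma cnt_EIGHT_S : "EIGHT".toList.count 'S' = 0 := by decide
lemma cnt_FIVE_I : "FIVE".toList.count 'I' = 1 := by decide
lemma cnt_FIVE_S : "FIVE".toList.count 'S' = 0 := by decide
lemma cnt_FOUR_F : "FOUR".toList.count 'F' = 1 := by decide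
lemma cnt_FOUR_G : "FOUR".toList.count 'G' = 0 := by decide
lemma cnt_FOUR_H : "FOUR".toList.count 'H' = 0 := by decide
lemma cnt_FOUR_I : "FOUR".toList.count 'I' = 0 := by decide
lemma cnt_FOUR_O : "FOUR".toList.count 'O' = 1 := by decide
lemma cnt_FOUR_S : "FOUR".toList.count 'S' = 0 := by decide
lemma cnt_FOUR_X : "FOUR".toList.count 'X' = 0 := by decide
lemma cnt_ONE_F : "ONE".toList.count 'F' = 0 := by decide
lemma cnt_ONE_H : "ONE".toList.count 'H' = 0 := by decide
lemma cnt_ONE_I : "ONE".toList.count 'I' = 0 := by decide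
lemma cnt_ONE_S : "ONE".toList.count 'S' = 0 := by decide
lemma cnt_SEVEN_I : "SEVEN".toList.count 'I' = 0 := by decide
lemma cnt_SIX_F : "SIX".toList.count 'F' = 0 := by decide
lemma cnt_SIX_G : "SIX".toList.count 'G' = 0 := by decide
lemma cnt_SIX_H : "SIX".toList.count 'H' = 0 := by decide
lemma cnt_SIX_I : "SIX".toList.count 'I' = 1 := by decide
lemma cnt_SIX_O : "SIX".toList.count 'O' = 0 := by decide
lemma cnt_SIX_S : "SIX".toList.count 'S' = 1 := by decide
lemma cnt_THREE_F : "THREE".toList.count 'F' = 0 := by decide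
lemma cnt_THREE_I : "THREE".toList.count 'I' = 0 := by decide
lemma cnt_THREE_S : "THREE".toList.count 'S' = 0 := by decide
lemma cnt_TWO_F : "TWO".toList.count 'F' = 0 := by decide
lemma cnt_TWO_G : "TWO".toList.count 'G' = 0 := by decide
lemma cnt_TWO_H : "TWO".toList.count 'H' = 0 := by decide
lemma cnt_TWO_I : "TWO".toList.count 'I' = 0 := by decide
lemma cnt_TWO_O : "TWO".toList.count 'O' = 1 := by decide
lemma cnt_TWO_S : "TWO".toList.count 'S' = 0 := by decide
lemma cnt_TWO_U : "TWO".toList.count 'U' = 0 := by decide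
lemma cnt_TWO_X : "TWO".toList.count 'X' = 0 := by decide
lemma cnt_ZERO_F : "ZERO".toList.count 'F' = 0 := by decide
lemma cnt_ZERO_G : "ZERO".toList.count 'G' = 0 := by decide
lemma cnt_ZERO_H : "ZERO".toList.count 'H' = 0 := by decide
lemma cnt_ZERO_I : "ZERO".toList.count 'I' = 0 := by decide
lemma cnt_ZERO_O : "ZERO".toList.count 'O' = 1 := by decide
lemma cnt_ZERO_S : "ZERO".toList.count 'S' = 0 := by decide
lemma cnt_ZERO_U : "ZERO".toList.count 'U' = 0 := by decide
lemma cnt_ZERO_W : "ZERO".toList.count 'W' = 0 := by decide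
lemma cnt_ZERO_X : "ZERO".toList.count 'X' = 0 := by decide

-- the heart: A's digit-count list equals B's closed-form list
lemma digits_eq (p : String) :
    (solveWords.foldl solveStage
      (solveCountLoop p.toList PySem.Dict.empty, List.replicate 10 (0 : Int))).2
    = [((p.toList.count 'Z' : Int)),
       max 0 ((p.toList.count 'O' : Int) - p.toList.count 'Z' - p.toList.count 'W' - p.toList.count 'U'),
       ((p.toList.count 'W' : Int)),
       max 0 ((p.toList.count 'H' : Int) - p.toList.count 'G'),
       ((p.toList.count 'U' : Int)),
       max 0 ((p.toList.count 'F' : Int) - p.toList.count 'U'),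
       ((p.toList.count 'X' : Int)),
       max 0 ((p.toList.count 'S' : Int) - p.toList.count 'X'),
       ((p.toList.count 'G' : Int)),
       max 0 ((p.toList.count 'I' : Int) - p.toList.count 'X' - p.toList.count 'G'
              - max 0 ((p.toList.count 'F' : Int) - p.toList.count 'U'))] := by
  have h0m : ∀ ch, (solveCountLoop p.toList PySem.Dict.empty, List.replicate 10 (0 : Int)).1.getD ch 0 = (p.toList.count ch : Int) := by
    intro ch
    rw [solveCountLoop_eq, PySem.Dict.foldl_insert_getD_add_one_eq_counter, PySem.Dict.getD_counter]
  have h0c : ∀ ch, (solveCountLoop p.toList PySem.Dict.empty, List.replicate 10 (0 : Int)).1.contains ch = false → (p.toList.count ch : Int) = 0 := by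
    intro ch h
    rw [solveCountLoop_eq, PySem.Dict.foldl_insert_getD_add_one_eq_counter, PySem.Dict.contains_counter] at h
    have hnm : ch ∉ p.toList := by simpa using h
    simp [List.count_eq_zero.mpr hnm]
  -- stage 1: ZERO
  obtain ⟨h1m, h1c, h1d⟩ := stage_spec (solveCountLoop p.toList PySem.Dict.empty, List.replicate 10 (0 : Int)) (fun ch => (p.toList.count ch : Int)) 'Z' "ZERO".toList 0 h0m h0c
  simp only [hmaxnat] at h1m h1c h1d
  -- stage 2: TWO
  obtain ⟨h2m, h2c, h2d⟩ := stage_spec (solveStage (solveCountLoop p.toList PySem.Dict.empty, List.replicate 10 (0 : Int)) ('Z', "ZERO".toList, 0)) (fun ch => (p.toList.count ch : Int) - ((p.toList.count 'Z' : Int)) * ("ZERO".toList.count ch : Int)) 'W' "TWO".toList 2 h1m h1c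
  have hv2 : (fun ch => (p.toList.count ch : Int) - ((p.toList.count 'Z' : Int)) * ("ZERO".toList.count ch : Int)) 'W' = ((p.toList.count 'W' : Int)) := by
    simp only [cnt_ZERO_W, Nat.cast_zero, mul_zero, sub_zero]
  simp only [hv2] at h2m h2c h2d
  simp only [hmaxnat] at h2m h2c
  -- stage 3: FOUR
  obtain ⟨h3m, h3c, h3d⟩ := stage_spec (solveStage (solveStage (solveCountLoop p.toList PySem.Dict.empty, List.replicate 10 (0 : Int)) ('Z', "ZERO".toList, 0)) ('W', "TWO".toList, 2)) (fun ch => (p.toList.count ch : Int) - ((p.toList.count 'Z' : Int)) * ("ZERO".toList.count ch : Int) - ((p.toList.count 'W' : Int)) * ("TWO".toList.count ch : Int)) 'U' "FOUR".toList 4 h2m h2c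
  have hv3 : (fun ch => (p.toList.count ch : Int) - ((p.toList.count 'Z' : Int)) * ("ZERO".toList.count ch : Int) - ((p.toList.count 'W' : Int)) * ("TWO".toList.count ch : Int)) 'U' = ((p.toList.count 'U' : Int)) := by
    simp only [cnt_ZERO_U, cnt_TWO_U, Nat.cast_zero, mul_zero, sub_zero]
  simp only [hv3] at h3m h3c h3d
  simp only [hmaxnat] at h3m h3c
  -- stage 4: SIX
  obtain ⟨h4m, h4c, h4d⟩ := stage_spec (solveStage (solveStage (solveStage (solveCountLoop p.toList PySem.Dict.empty, List.replicate 10 (0 : Int)) ('Z', "ZERO".toList, 0)) ('W', "TWO".toList, 2)) ('U', "FOUR".toList, 4)) (fun ch => (p.toList.count ch : Int) - ((p.toList.count 'Z' : Int)) * ("ZERO".toList.count ch : Int) - ((p.toList.count 'W' : Int)) * ("TWO".toList.count ch : Int) - ((p.toList.count 'U' : Int)) * ("FOUR".toList.count ch : Int)) 'X' "SIX".toList 6 h3m h3c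
  have hv4 : (fun ch => (p.toList.count ch : Int) - ((p.toList.count 'Z' : Int)) * ("ZERO".toList.count ch : Int) - ((p.toList.count 'W' : Int)) * ("TWO".toList.count ch : Int) - ((p.toList.count 'U' : Int)) * ("FOUR".toList.count ch : Int)) 'X' = ((p.toList.count 'X' : Int)) := by
    simp only [cnt_ZERO_X, cnt_TWO_X, cnt_FOUR_X, Nat.cast_zero, mul_zero, sub_zero]
  simp only [hv4] at h4m h4c h4d
  simp only [hmaxnat] at h4m h4c
  -- stage 5: EIGHT
  obtain ⟨h5m, h5c, h5d⟩ := stage_spec (solveStage (solveStage (solveStage (solveStage (solveCountLoop p.toList PySem.Dict.empty, List.replicate 10 (0 : Int)) ('Z', "ZERO".toList, 0)) ('W', "TWO".toList, 2)) ('U', "FOUR".toList, 4)) ('X', "SIX".toList, 6)) (fun ch => (p.toList.count ch : Int) - ((p.toList.count 'Z' : Int)) * ("ZERO".toList.count ch : Int) - ((p.toList.count 'W' : Int)) * ("TWO".toList.count ch : Int) - ((p.toList.count 'U' : Int)) * ("FOUR".toList.count ch : Int) - ((p.toList.count 'X' : Int)) * ("SIX".toList.count ch : Int)) 'G' "EIGHT".toList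 8 h4m h4c
  have hv5 : (fun ch => (p.toList.count ch : Int) - ((p.toList.count 'Z' : Int)) * ("ZERO".toList.count ch : Int) - ((p.toList.count 'W' : Int)) * ("TWO".toList.count ch : Int) - ((p.toList.count 'U' : Int)) * ("FOUR".toList.count ch : Int) - ((p.toList.count 'X' : Int)) * ("SIX".toList.count ch : Int)) 'G' = ((p.toList.count 'G' : Int)) := by
    simp only [cnt_ZERO_G, cnt_TWO_G, cnt_FOUR_G, cnt_SIX_G, Nat.cast_zero, mul_zero, sub_zero]
  simp only [hv5] at h5m h5c h5d
  simp only [hmaxnat] at h5m h5c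
  -- stage 6: ONE
  obtain ⟨h6m, h6c, h6d⟩ := stage_spec (solveStage (solveStage (solveStage (solveStage (solveStage (solveCountLoop p.toList PySem.Dict.empty, List.replicate 10 (0 : Int)) ('Z', "ZERO".toList, 0)) ('W', "TWO".toList, 2)) ('U', "FOUR".toList, 4)) ('X', "SIX".toList, 6)) ('G', "EIGHT".toList, 8)) (fun ch => (p.toList.count ch : Int) - ((p.toList.count 'Z' : Int)) * ("ZERO".toList.count ch : Int) - ((p.toList.count 'W' : Int)) * ("TWO".toList.count ch : Int) - ((p.toList.count 'U' : Int)) * ("FOUR".toList.count ch : Int) - ((p.toList.count 'X' : Int)) * ("SIX".toList.count ch : Int) - ((p.toList.count 'G' : Int)) * ("EIGHT".toList.count ch : Int)) 'O' "ONE".toList 1 h5m h5c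
  have hv6 : (fun ch => (p.toList.count ch : Int) - ((p.toList.count 'Z' : Int)) * ("ZERO".toList.count ch : Int) - ((p.toList.count 'W' : Int)) * ("TWO".toList.count ch : Int) - ((p.toList.count 'U' : Int)) * ("FOUR".toList.count ch : Int) - ((p.toList.count 'X' : Int)) * ("SIX".toList.count ch : Int) - ((p.toList.count 'G' : Int)) * ("EIGHT".toList.count ch : Int)) 'O' = (((p.toList.count 'O' : Int)) - ((p.toList.count 'Z' : Int)) - ((p.toList.count 'W' : Int)) - ((p.toList.count 'U' : Int))) := by
    simp only [cnt_ZERO_O, cnt_TWO_O, cnt_FOUR_O, cnt_SIX_O, cnt_EIGHT_O, Nat.cast_zero, mul_zero, sub_zero, Nat.cast_one, mul_one]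
  simp only [hv6] at h6m h6c h6d
  -- stage 7: THREE
  obtain ⟨h7m, h7c, h7d⟩ := stage_spec (solveStage (solveStage (solveStage (solveStage (solveStage (solveStage (solveCountLoop p.toList PySem.Dict.empty, List.replicate 10 (0 : Int)) ('Z', "ZERO".toList, 0)) ('W', "TWO".toList, 2)) ('U', "FOUR".toList, 4)) ('X', "SIX".toList, 6)) ('G', "EIGHT".toList, 8)) ('O', "ONE".toList, 1)) (fun ch => (p.toList.count ch : Int) - ((p.toList.count 'Z' : Int)) * ("ZERO".toList.count ch : Int) - ((p.toList.count 'W' : Int)) * ("TWO".toList.count ch : Int) - ((p.toList.count 'U' : Int)) * ("FOUR".toList.count ch : Int) - ((p.toList.count 'X' : Int)) * ("SIX".toList.count ch : Int) - ((p.toList.count 'G' : Int)) * ("EIGHT".toList.count ch : Int) - max 0 (((p.toList.count 'O' : Int)) - ((p.toList.count 'Z' : Int)) - ((p.toList.count 'W' : Int)) - ((p.toList.count 'U' : Int))) * ("ONE".toList.count ch : Int)) 'H' "THREE".toList 3 h6m h6c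
  have hv7 : (fun ch => (p.toList.count ch : Int) - ((p.toList.count 'Z' : Int)) * ("ZERO".toList.count ch : Int) - ((p.toList.count 'W' : Int)) * ("TWO".toList.count ch : Int) - ((p.toList.count 'U' : Int)) * ("FOUR".toList.count ch : Int) - ((p.toList.count 'X' : Int)) * ("SIX".toList.count ch : Int) - ((p.toList.count 'G' : Int)) * ("EIGHT".toList.count ch : Int) - max 0 (((p.toList.count 'O' : Int)) - ((p.toList.count 'Z' : Int)) - ((p.toList.count 'W' : Int)) - ((p.toList.count 'U' : Int))) * ("ONE".toList.count ch : Int)) 'H' = (((p.toList.count 'H' : Int)) - ((p.toList.count 'G' : Int))) := by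
    simp only [cnt_ZERO_H, cnt_TWO_H, cnt_FOUR_H, cnt_SIX_H, cnt_EIGHT_H, cnt_ONE_H, Nat.cast_zero, mul_zero, sub_zero, Nat.cast_one, mul_one]
  simp only [hv7] at h7m h7c h7d
  -- stage 8: FIVE
  obtain ⟨h8m, h8c, h8d⟩ := stage_spec (solveStage (solveStage (solveStage (solveStage (solveStage (solveStage (solveStage (solveCountLoop p.toList PySem.Dict.empty, List.replicate 10 (0 : Int)) ('Z', "ZERO".toList, 0)) ('W', "TWO".toList, 2)) ('U', "FOUR".toList, 4)) ('X', "SIX".toList, 6)) ('G', "EIGHT".toList, 8)) ('O', "ONE".toList, 1)) ('H', "THREE".toList, 3)) (fun ch => (p.toList.count ch : Int) - ((p.toList.count 'Z' : Int)) * ("ZERO".toList.count ch : Int) - ((p.toList.count 'W' : Int)) * ("TWO".toList.count ch : Int) - ((p.toList.count 'U' : Int)) * ("FOUR".toList.count ch : Int) - ((p.toList.count 'X' : Int)) * ("SIX".toList.count ch : Int) - ((p.toList.count 'G' : Int)) * ("EIGHT".toList.count ch : Int) - max 0 (((p.toList.count 'O' : Int)) - ((p.toList.count 'Z' : Int)) -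 ((p.toList.count 'W' : Int)) - ((p.toList.count 'U' : Int))) * ("ONE".toList.count ch : Int) - max 0 (((p.toList.count 'H' : Int)) - ((p.toList.count 'G' : Int))) * ("THREE".toList.count ch : Int)) 'F' "FIVE".toList 5 h7m h7c
  have hv8 : (fun ch => (p.toList.count ch : Int) - ((p.toList.count 'Z' : Int)) * ("ZERO".toList.count ch : Int) - ((p.toList.count 'W' : Int)) * ("TWO".toList.count ch : Int) - ((p.toList.count 'U' : Int)) * ("FOUR".toList.count ch : Int) - ((p.toList.count 'X' : Int)) * ("SIX".toList.count ch : Int) - ((p.toList.count 'G' : Int)) * ("EIGHT".toList.count ch : Int) - max 0 (((p.toList.count 'O' : Int)) - ((p.toList.count 'Z' : Int)) - ((p.toList.count 'W' : Int)) - ((p.toList.count 'U' : Int))) * ("ONE".toList.count ch : Int) - max 0 (((p.toList.count 'H' : Int)) - ((p.toList.count 'G' : Int))) * ("THREE".toList.count ch : Int)) 'F' = (((p.toList.count 'F' : Int)) - ((p.toList.count 'U' : Int))) := by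
    simp only [cnt_ZERO_F, cnt_TWO_F, cnt_FOUR_F, cnt_SIX_F, cnt_EIGHT_F, cnt_ONE_F, cnt_THREE_F, Nat.cast_zero, mul_zero, sub_zero, Nat.cast_one, mul_one]
  simp only [hv8] at h8m h8c h8d
  -- stage 9: SEVEN
  obtain ⟨h9m, h9c, h9d⟩ := stage_spec (solveStage (solveStage (solveStage (solveStage (solveStage (solveStage (solveStage (solveStage (solveCountLoop p.toList PySem.Dict.empty, List.replicate 10 (0 : Int)) ('Z', "ZERO".toList, 0)) ('W', "TWO".toList, 2)) ('U', "FOUR".toList, 4)) ('X', "SIX".toList, 6)) ('G', "EIGHT".toList, 8)) ('O', "ONE".toList, 1)) ('H', "THREE".toList, 3)) ('F', "FIVE".toList, 5)) (fun ch => (p.toList.count ch : Int) - ((p.toList.count 'Z' : Int)) * ("ZERO".toList.count ch : Int) - ((p.toList.count 'W' : Int)) * ("TWO".toList.count ch : Int) - ((p.toList.count 'U' : Int)) * ("FOUR".toList.count ch : Int) - ((p.toList.count 'X' : Int)) * ("SIX".toList.count ch : Int) - ((p.toList.count 'G' : Int)) * ("EIGHT".toList.count ch : Int) - max 0 (((p.toList.count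 'O' : Int)) - ((p.toList.count 'Z' : Int)) - ((p.toList.count 'W' : Int)) - ((p.toList.count 'U' : Int))) * ("ONE".toList.count ch : Int) - max 0 (((p.toList.count 'H' : Int)) - ((p.toList.count 'G' : Int))) * ("THREE".toList.count ch : Int) - max 0 (((p.toList.count 'F' : Int)) - ((p.toList.count 'U' : Int))) * ("FIVE".toList.count ch : Int)) 'S' "SEVEN".toList 7 h8m h8c
  have hv9 : (fun ch => (p.toList.count ch : Int) - ((p.toList.count 'Z' : Int)) * ("ZERO".toList.count ch : Int) - ((p.toList.count 'W' : Int)) * ("TWO".toList.count ch : Int) - ((p.toList.count 'U' : Int)) * ("FOUR".toList.count ch : Int) - ((p.toList.count 'X' : Int)) * ("SIX".toList.count ch : Int) - ((p.toList.count 'G' : Int)) * ("EIGHT".toList.count ch : Int) - max 0 (((p.toList.count 'O' : Int)) - ((p.toList.count 'Z' : Int)) - ((p.toList.count 'W' : Int)) - ((p.toList.count 'U' : Int))) * ("ONE".toList.count ch : Int) - max 0 (((p.toList.count 'H' : Int)) - ((p.toList.count 'G' : Int))) * ("THREE".toList.count ch : Int) - max 0 (((p.toList.count 'F' : Int)) -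 ((p.toList.count 'U' : Int))) * ("FIVE".toList.count ch : Int)) 'S' = (((p.toList.count 'S' : Int)) - ((p.toList.count 'X' : Int))) := by
    simp only [cnt_ZERO_S, cnt_TWO_S, cnt_FOUR_S, cnt_SIX_S, cnt_EIGHT_S, cnt_ONE_S, cnt_THREE_S, cnt_FIVE_S, Nat.cast_zero, mul_zero, sub_zero, Nat.cast_one, mul_one]
  simp only [hv9] at h9m h9c h9d
  -- stage 10: NINE
  obtain ⟨h10m, h10c, h10d⟩ := stage_spec (solveStage (solveStage (solveStage (solveStage (solveStage (solveStage (solveStage (solveStage (solveStage (solveCountLoop p.toList PySem.Dict.empty, List.replicate 10 (0 : Int)) ('Z', "ZERO".toList, 0)) ('W', "TWO".toList, 2)) ('U', "FOUR".toList, 4)) ('X', "SIX".toList, 6)) ('G', "EIGHT".toList, 8)) ('O', "ONE".toList, 1)) ('H', "THREE".toList, 3)) ('F', "FIVE".toList, 5)) ('S', "SEVEN".toList, 7)) (fun ch => (p.toList.count ch : Int) - ((p.toList.count 'Z' : Int)) * ("ZERO".toList.count ch : Int) - ((p.toList.count 'W' : Int)) * ("TWO".toList.count ch : Int) - ((p.toList.count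 'U' : Int)) * ("FOUR".toList.count ch : Int) - ((p.toList.count 'X' : Int)) * ("SIX".toList.count ch : Int) - ((p.toList.count 'G' : Int)) * ("EIGHT".toList.count ch : Int) - max 0 (((p.toList.count 'O' : Int)) - ((p.toList.count 'Z' : Int)) - ((p.toList.count 'W' : Int)) - ((p.toList.count 'U' : Int))) * ("ONE".toList.count ch : Int) - max 0 (((p.toList.count 'H' : Int)) - ((p.toList.count 'G' : Int))) * ("THREE".toList.count ch : Int) - max 0 (((p.toList.count 'F' : Int)) - ((p.toList.count 'U' : Int))) * ("FIVE".toList.count ch : Int) - max 0 (((p.toList.count 'S' : Int)) - ((p.toList.count 'X' : Int))) * ("SEVEN".toList.count ch : Int)) 'I' "NINE".toList 9 h9m h9c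
  have hv10 : (fun ch => (p.toList.count ch : Int) - ((p.toList.count 'Z' : Int)) * ("ZERO".toList.count ch : Int) - ((p.toList.count 'W' : Int)) * ("TWO".toList.count ch : Int) - ((p.toList.count 'U' : Int)) * ("FOUR".toList.count ch : Int) - ((p.toList.count 'X' : Int)) * ("SIX".toList.count ch : Int) - ((p.toList.count 'G' : Int)) * ("EIGHT".toList.count ch : Int) - max 0 (((p.toList.count 'O' : Int)) - ((p.toList.count 'Z' : Int)) - ((p.toList.count 'W' : Int)) - ((p.toList.count 'U' : Int))) * ("ONE".toList.count ch : Int) - max 0 (((p.toList.count 'H' : Int)) - ((p.toList.count 'G' : Int))) * ("THREE".toList.count ch : Int) - max 0 (((p.toList.count 'F' : Int)) - ((p.toList.count 'U' : Int))) * ("FIVE".toList.count ch : Int) - max 0 (((p.toList.count 'S' : Int)) - ((p.toList.count 'X' : Int))) * ("SEVEN".toList.count ch : Int)) 'I' = (((p.toList.count 'I' : Int)) - ((p.toList.count 'X' : Int)) - ((p.toList.count 'G' : Int)) - max 0 (((p.toList.count 'F' : Int)) - ((p.toList.count 'U' : Int)))) := by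
    simp only [cnt_ZERO_I, cnt_TWO_I, cnt_FOUR_I, cnt_SIX_I, cnt_EIGHT_I, cnt_ONE_I, cnt_THREE_I, cnt_FIVE_I, cnt_SEVEN_I, Nat.cast_zero, mul_zero, sub_zero, Nat.cast_one, mul_one]
  simp only [hv10] at h10m h10c h10d
  simp only [solveWords, List.foldl_cons, List.foldl_nil]
  rw [h10d, h9d, h8d, h7d, h6d, h5d, h4d, h3d, h2d, h1d]
  rw [show List.replicate 10 (0 : Int) = ([0,0,0,0,0,0,0,0,0,0] : List Int) from rfl]
  have hd1 : (if 0 < ((p.toList.count 'Z' : Int)) then ([0, 0, 0, 0, 0, 0, 0, 0, 0, 0] : List Int).set 0 ((p.toList.count 'Z' : Int)) else ([0, 0, 0, 0, 0, 0, 0, 0, 0, 0] : List Int)) = ([max 0 ((p.toList.count 'Z' : Int)), 0, 0, 0, 0, 0, 0, 0, 0, 0] : List Int) := by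
    rw [set_if_eq _ _ _ rfl]; rfl
  have hd2 : (if 0 < ((p.toList.count 'W' : Int)) then ([max 0 ((p.toList.count 'Z' : Int)), 0, 0, 0, 0, 0, 0, 0, 0, 0] : List Int).set 2 ((p.toList.count 'W' : Int)) else ([max 0 ((p.toList.count 'Z' : Int)), 0, 0, 0, 0, 0, 0, 0, 0, 0] : List Int)) = ([max 0 ((p.toList.count 'Z' : Int)), 0, max 0 ((p.toList.count 'W' : Int)), 0, 0, 0, 0, 0, 0, 0] : List Int) := by
    rw [set_if_eq _ _ _ rfl]; rfl
  have hd3 : (if 0 < ((p.toList.count 'U' : Int)) then ([max 0 ((p.toList.count 'Z' : Int)), 0, max 0 ((p.toList.count 'W' : Int)), 0, 0, 0, 0, 0, 0, 0] : List Int).set 4 ((p.toList.count 'U' : Int)) else ([max 0 ((p.toList.count 'Z' : Int)), 0, max 0 ((p.toList.count 'W' : Int)), 0, 0, 0, 0, 0, 0, 0] : List Int)) = ([max 0 ((p.toList.count 'Z' : Int)), 0, max 0 ((p.toList.count 'W' : Int)), 0, max 0 ((p.toList.count 'U' : Int)), 0, 0, 0, 0, 0] : List Int) := by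
    rw [set_if_eq _ _ _ rfl]; rfl
  have hd4 : (if 0 < ((p.toList.count 'X' : Int)) then ([max 0 ((p.toList.count 'Z' : Int)), 0, max 0 ((p.toList.count 'W' : Int)), 0, max 0 ((p.toList.count 'U' : Int)), 0, 0, 0, 0, 0] : List Int).set 6 ((p.toList.count 'X' : Int)) else ([max 0 ((p.toList.count 'Z' : Int)), 0, max 0 ((p.toList.count 'W' : Int)), 0, max 0 ((p.toList.count 'U' : Int)), 0, 0, 0, 0, 0] : List Int)) = ([max 0 ((p.toList.count 'Z' : Int)), 0, max 0 ((p.toList.count 'W' : Int)), 0, max 0 ((p.toList.count 'U' : Int)), 0, max 0 ((p.toList.count 'X' : Int)), 0, 0, 0] : List Int) := by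
    rw [set_if_eq _ _ _ rfl]; rfl
  have hd5 : (if 0 < ((p.toList.count 'G' : Int)) then ([max 0 ((p.toList.count 'Z' : Int)), 0, max 0 ((p.toList.count 'W' : Int)), 0, max 0 ((p.toList.count 'U' : Int)), 0, max 0 ((p.toList.count 'X' : Int)), 0, 0, 0] : List Int).set 8 ((p.toList.count 'G' : Int)) else ([max 0 ((p.toList.count 'Z' : Int)), 0, max 0 ((p.toList.count 'W' : Int)), 0, max 0 ((p.toList.count 'U' : Int)), 0, max 0 ((p.toList.count 'X' : Int)), 0, 0, 0] : List Int)) = ([max 0 ((p.toList.count 'Z' : Int)), 0, max 0 ((p.toList.count 'W' : Int)), 0, max 0 ((p.toList.count 'U' : Int)), 0, max 0 ((p.toList.count 'X' : Int)), 0, max 0 ((p.toList.count 'G' : Int)), 0] : List Int) := by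
    rw [set_if_eq _ _ _ rfl]; rfl
  have hd6 : (if 0 < (((p.toList.count 'O' : Int)) - ((p.toList.count 'Z' : Int)) - ((p.toList.count 'W' : Int)) - ((p.toList.count 'U' : Int))) then ([max 0 ((p.toList.count 'Z' : Int)), 0, max 0 ((p.toList.count 'W' : Int)), 0, max 0 ((p.toList.count 'U' : Int)), 0, max 0 ((p.toList.count 'X' : Int)), 0, max 0 ((p.toList.count 'G' : Int)), 0] : List Int).set 1 (((p.toList.count 'O' : Int)) - ((p.toList.count 'Z' : Int)) - ((p.toList.count 'W' : Int)) - ((p.toList.count 'U' : Int))) else ([max 0 ((p.toList.count 'Z' : Int)), 0, max 0 ((p.toList.count 'W' : Int)), 0, max 0 ((p.toList.count 'U' : Int)), 0, max 0 ((p.toList.count 'X' : Int)), 0, max 0 ((p.toList.count 'G' : Int)), 0] : List Int)) = ([max 0 ((p.toList.count 'Z' : Int)), max 0 (((p.toList.count 'O' : Int)) - ((p.toList.count 'Z' : Int)) - ((p.toList.count 'W' : Int)) - ((p.toList.count 'U' : Int))), max 0 ((p.toList.count 'W' : Int)), 0, max 0 ((p.toList.count 'U' : Int)), 0, max 0 ((p.toList.count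 'X' : Int)), 0, max 0 ((p.toList.count 'G' : Int)), 0] : List Int) := by
    rw [set_if_eq _ _ _ rfl]; rfl
  have hd7 : (if 0 < (((p.toList.count 'H' : Int)) - ((p.toList.count 'G' : Int))) then ([max 0 ((p.toList.count 'Z' : Int)), max 0 (((p.toList.count 'O' : Int)) - ((p.toList.count 'Z' : Int)) - ((p.toList.count 'W' : Int)) - ((p.toList.count 'U' : Int))), max 0 ((p.toList.count 'W' : Int)), 0, max 0 ((p.toList.count 'U' : Int)), 0, max 0 ((p.toList.count 'X' : Int)), 0, max 0 ((p.toList.count 'G' : Int)), 0] : List Int).set 3 (((p.toList.count 'H' : Int)) - ((p.toList.count 'G' : Int))) else ([max 0 ((p.toList.count 'Z' : Int)), max 0 (((p.toList.count 'O' : Int)) - ((p.toList.count 'Z' : Int)) - ((p.toList.count 'W' : Int)) - ((p.toList.count 'U' : Int))), max 0 ((p.toList.count 'W' : Int)), 0, max 0 ((p.toList.count 'U' : Int)), 0, max 0 ((p.toList.count 'X' : Int)), 0, max 0 ((p.toList.count 'G' : Int)), 0] : List Int)) = ([max 0 ((p.toList.count 'Z' : Int)), max 0 (((p.toList.count 'O'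 : Int)) - ((p.toList.count 'Z' : Int)) - ((p.toList.count 'W' : Int)) - ((p.toList.count 'U' : Int))), max 0 ((p.toList.count 'W' : Int)), max 0 (((p.toList.count 'H' : Int)) - ((p.toList.count 'G' : Int))), max 0 ((p.toList.count 'U' : Int)), 0, max 0 ((p.toList.count 'X' : Int)), 0, max 0 ((p.toList.count 'G' : Int)), 0] : List Int) := by
    rw [set_if_eq _ _ _ rfl]; rfl
  have hd8 : (if 0 < (((p.toList.count 'F' : Int)) - ((p.toList.count 'U' : Int))) then ([max 0 ((p.toList.count 'Z' : Int)), max 0 (((p.toList.count 'O' : Int)) - ((p.toList.count 'Z' : Int)) - ((p.toList.count 'W' : Int)) - ((p.toList.count 'U' : Int))), max 0 ((p.toList.count 'W' : Int)), max 0 (((p.toList.count 'H' : Int)) - ((p.toList.count 'G' : Int))), max 0 ((p.toList.count 'U' : Int)), 0, max 0 ((p.toList.count 'X' : Int)), 0, max 0 ((p.toList.count 'G' : Int)), 0] : List Int).set 5 (((p.toList.count 'F' : Int)) - ((p.toList.count 'U' : Int))) else ([max 0 ((p.toList.count 'Z' : Int)), max 0 (((p.toList.count 'O' : Int)) - ((p.toList.count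 'Z' : Int)) - ((p.toList.count 'W' : Int)) - ((p.toList.count 'U' : Int))), max 0 ((p.toList.count 'W' : Int)), max 0 (((p.toList.count 'H' : Int)) - ((p.toList.count 'G' : Int))), max 0 ((p.toList.count 'U' : Int)), 0, max 0 ((p.toList.count 'X' : Int)), 0, max 0 ((p.toList.count 'G' : Int)), 0] : List Int)) = ([max 0 ((p.toList.count 'Z' : Int)), max 0 (((p.toList.count 'O' : Int)) - ((p.toList.count 'Z' : Int)) - ((p.toList.count 'W' : Int)) - ((p.toList.count 'U' : Int))), max 0 ((p.toList.count 'W' : Int)), max 0 (((p.toList.count 'H' : Int)) - ((p.toList.count 'G' : Int))), max 0 ((p.toList.count 'U' : Int)), max 0 (((p.toList.count 'F' : Int)) - ((p.toList.count 'U' : Int))), max 0 ((p.toList.count 'X' : Int)), 0, max 0 ((p.toList.count 'G' : Int)), 0] : List Int) := by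
    rw [set_if_eq _ _ _ rfl]; rfl
  have hd9 : (if 0 < (((p.toList.count 'S' : Int)) - ((p.toList.count 'X' : Int))) then ([max 0 ((p.toList.count 'Z' : Int)), max 0 (((p.toList.count 'O' : Int)) - ((p.toList.count 'Z' : Int)) - ((p.toList.count 'W' : Int)) - ((p.toList.count 'U' : Int))), max 0 ((p.toList.count 'W' : Int)), max 0 (((p.toList.count 'H' : Int)) - ((p.toList.count 'G' : Int))), max 0 ((p.toList.count 'U' : Int)), max 0 (((p.toList.count 'F' : Int)) - ((p.toList.count 'U' : Int))), max 0 ((p.toList.count 'X' : Int)), 0, max 0 ((p.toList.count 'G' : Int)), 0] : List Int).set 7 (((p.toList.count 'S' : Int)) - ((p.toList.count 'X' : Int))) else ([max 0 ((p.toList.count 'Z' : Int)), max 0 (((p.toList.count 'O' : Int)) - ((p.toList.count 'Z' : Int)) - ((p.toList.count 'W' : Int)) - ((p.toList.count 'U' : Int))), max 0 ((p.toList.count 'W' : Int)), max 0 (((p.toList.count 'H' : Int)) - ((p.toList.count 'G' : Int))), max 0 ((p.toList.count 'U' : Int)), max 0 (((p.toList.count 'F' : Int)) - ((p.toList.count 'U'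 : Int))), max 0 ((p.toList.count 'X' : Int)), 0, max 0 ((p.toList.count 'G' : Int)), 0] : List Int)) = ([max 0 ((p.toList.count 'Z' : Int)), max 0 (((p.toList.count 'O' : Int)) - ((p.toList.count 'Z' : Int)) - ((p.toList.count 'W' : Int)) - ((p.toList.count 'U' : Int))), max 0 ((p.toList.count 'W' : Int)), max 0 (((p.toList.count 'H' : Int)) - ((p.toList.count 'G' : Int))), max 0 ((p.toList.count 'U' : Int)), max 0 (((p.toList.count 'F' : Int)) - ((p.toList.count 'U' : Int))), max 0 ((p.toList.count 'X' : Int)), max 0 (((p.toList.count 'S' : Int)) - ((p.toList.count 'X' : Int))), max 0 ((p.toList.count 'G' : Int)), 0] : List Int) := by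
    rw [set_if_eq _ _ _ rfl]; rfl
  have hd10 : (if 0 < (((p.toList.count 'I' : Int)) - ((p.toList.count 'X' : Int)) - ((p.toList.count 'G' : Int)) - max 0 (((p.toList.count 'F' : Int)) - ((p.toList.count 'U' : Int)))) then ([max 0 ((p.toList.count 'Z' : Int)), max 0 (((p.toList.count 'O' : Int)) - ((p.toList.count 'Z' : Int)) - ((p.toList.count 'W' : Int)) - ((p.toList.count 'U' : Int))), max 0 ((p.toList.count 'W' : Int)), max 0 (((p.toList.count 'H' : Int)) - ((p.toList.count 'G' : Int))), max 0 ((p.toList.count 'U' : Int)), max 0 (((p.toList.count 'F' : Int)) - ((p.toList.count 'U' : Int))), max 0 ((p.toList.count 'X' : Int)), max 0 (((p.toList.count 'S' : Int)) - ((p.toList.count 'X' : Int))), max 0 ((p.toList.count 'G' : Int)), 0] : List Int).set 9 (((p.toList.count 'I' : Int)) - ((p.toList.count 'X' : Int)) - ((p.toList.count 'G' : Int)) - max 0 (((p.toList.count 'F' : Int)) - ((p.toList.count 'U' : Int)))) else ([max 0 ((p.toList.count 'Z' : Int)), max 0 (((p.toList.count 'O' : Int)) - ((p.toList.count 'Z'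 : Int)) - ((p.toList.count 'W' : Int)) - ((p.toList.count 'U' : Int))), max 0 ((p.toList.count 'W' : Int)), max 0 (((p.toList.count 'H' : Int)) - ((p.toList.count 'G' : Int))), max 0 ((p.toList.count 'U' : Int)), max 0 (((p.toList.count 'F' : Int)) - ((p.toList.count 'U' : Int))), max 0 ((p.toList.count 'X' : Int)), max 0 (((p.toList.count 'S' : Int)) - ((p.toList.count 'X' : Int))), max 0 ((p.toList.count 'G' : Int)), 0] : List Int)) = ([max 0 ((p.toList.count 'Z' : Int)), max 0 (((p.toList.count 'O' : Int)) - ((p.toList.count 'Z' : Int)) - ((p.toList.count 'W' : Int)) - ((p.toList.count 'U' : Int))), max 0 ((p.toList.count 'W' : Int)), max 0 (((p.toList.count 'H' : Int)) - ((p.toList.count 'G' : Int))), max 0 ((p.toList.count 'U' : Int)), max 0 (((p.toList.count 'F' : Int)) - ((p.toList.count 'U' : Int))), max 0 ((p.toList.count 'X' : Int)), max 0 (((p.toList.count 'S' : Int)) - ((p.toList.count 'X' : Int))), max 0 ((p.toList.count 'G' : Int)), max 0 (((p.toList.count 'I' : Int)) - ((p.toList.count 'X' : Int)) - ((p.toList.count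 'G' : Int)) - max 0 (((p.toList.count 'F' : Int)) - ((p.toList.count 'U' : Int))))] : List Int) := by
    rw [set_if_eq _ _ _ rfl]; rfl
  rw [hd1, hd2, hd3, hd4, hd5, hd6, hd7, hd8, hd9, hd10]
  simp only [hmaxnat]

-- ===== VERDICT (by name: the statement is the Claim_ definition above) =====
theorem solve_spec : Claim_equal_solve := by
  intro p _ _
  show solve p = solve_alt p
  unfold solve solve_alt
  simp only [solveAltN_eq]
  exact congrArg solveAssemble (digits_eq p)
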